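-- pv_equiv track=rewrite | github.com/wesuuu/competitive-programming-practice | code-forces/by-difficulty/1500-tetrahedron.py | recurrence_count
-- ===== SOURCE A (Python) =====
-- def recurrence_count(n):
--     # O(N) solution, store previous counts in matrix
--     dp = [[0]*(n+1), [0]*(n+1)]
--     dp[1][0] = 1
--     dp[0][0] = 0
--     j = 1
--     while j <= n:
--         dp[1][j] = 3*dp[0][j-1] % ((10**9) + 7)
--         dp[0][j] = 2*dp[0][j-1] + dp[1][j-1] % ((10**9) + 7)
--         j += 1
--
--     return dp[1][n]
-- ===== SOURCE B (Python) =====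
-- MOD = 10**9 + 7
--
-- def recurrence_count(n):
--     # Closed form of the order-2 recurrence: a(n) = (3^n + 3*(-1)^n) / 4 mod MOD,
--     # computed with modular fast exponentiation and the literal inverse of 4.
--     s = 3 if n % 2 == 0 else -3
--     return (pow(3, n, MOD) + s) * ((MOD + 1) // 4) % MOD
-- ===== Notes on version B (the rewrite author's own statement) =====
-- stated objective: faster
-- what changed: Replaces the O(n)-iteration DP (whose unreduced dp[0] row grows to ~2^n-sized integers) by the closed form (3^n + 3*(-1)^n)/4 mod 1e9+7 via built-in modular exponentiation.
import Mathlib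
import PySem

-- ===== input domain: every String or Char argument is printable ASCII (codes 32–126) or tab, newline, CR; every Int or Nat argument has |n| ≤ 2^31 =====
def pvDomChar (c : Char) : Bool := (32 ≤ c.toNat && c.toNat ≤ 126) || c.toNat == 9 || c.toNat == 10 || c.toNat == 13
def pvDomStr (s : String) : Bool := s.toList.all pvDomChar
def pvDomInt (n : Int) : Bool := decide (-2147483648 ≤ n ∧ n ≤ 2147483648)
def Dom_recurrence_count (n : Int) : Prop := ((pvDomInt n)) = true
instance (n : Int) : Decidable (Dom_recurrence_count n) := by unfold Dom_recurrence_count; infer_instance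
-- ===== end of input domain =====

-- B replaces A's O(n) DP loop (whose unreduced dp[0] row grows without bound) by the
-- closed form (3^n + 3*(-1)^n)/4 mod 1e9+7; equivalence is proved for all n ≥ 0.

-- ===== PORT A =====
def pvM : Int := 1000000007

-- one iteration of A's while-loop body (dp[1][j] first, then dp[0][j], exactly as in Python,
-- including the precedence quirk: only dp[1][j-1] is reduced mod 1e9+7 in the dp[0] update)
def aStep (dp : List Int × List Int) (j : Nat) : List Int × List Int :=
  let dp1 := dp.2.set j (3 * dp.1.getD (j-1) 0 % pvM)
  let dp0 := dp.1.set j (2 * dp.1.getD (j-1) 0 + dp1.getD (j-1) 0 % pvM)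
  (dp0, dp1)

def recurrence_count (n : Int) : Int :=
  if n < 0 then 0  -- Python raises IndexError here (dp[1][0] on an empty row); excluded by Pre_
  else
    let m := n.toNat
    let dp0 := List.replicate (m+1) (0:Int)
    let dp1 := (List.replicate (m+1) (0:Int)).set 0 1
    let r := (List.range' 1 m).foldl aStep (dp0, dp1)
    r.2.getD m 0

-- ===== PORT B =====
-- pow(3, n, MOD) for n ≥ 0 is ported as the corresponding library expression 3 ^ n % MOD
def pvMODB : Int := 10 ^ 9 + 7

def recurrence_count_alt (n : Int) : Int :=
  let s : Int := if n % 2 == 0 then 3 else -3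
  (3 ^ n.toNat % pvMODB + s) * ((pvMODB + 1) / 4) % pvMODB

-- ===== PRECONDITION & SPEC =====
-- A raises IndexError for n < 0 (the rows [0]*(n+1) are empty); Pre_ excludes exactly those inputs.
def Pre_recurrence_count (n : Int) : Prop := 0 ≤ n
instance (n : Int) : Decidable (Pre_recurrence_count n) := by unfold Pre_recurrence_count; infer_instance
def pvWitness_recurrence_count : Int := (3)

def Spec_recurrence_count (n : Int) (out : Int) : Prop := out = recurrence_count_alt n
instance (n : Int) (out : Int) : Decidable (Spec_recurrence_count n out) := by unfold Spec_recurrence_count; infer_instance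

-- ===== CLAIM (what is proved, stated in full; the proofs are below) =====
def Claim_equal_recurrence_count : Prop := ∀ (n : Int), Dom_recurrence_count n → Pre_recurrence_count n → Spec_recurrence_count n (recurrence_count n)

-- ===== LEMMAS AND PROOFS =====

-- reference scalars: (XY k).1 = dp[0][k], (XY k).2 = dp[1][k] after A's loop has passed column k
def XY : Nat → Int × Int
  | 0 => (0, 1)
  | k+1 => (2 * (XY k).1 + (XY k).2 % pvM, 3 * (XY k).1 % pvM)

lemma loop_inv (m k : Nat) (hk : k ≤ m) :
    ((List.range' 1 k).foldl aStep
      (List.replicate (m+1) (0:Int), (List.replicate (m+1) (0:Int)).set 0 1)).1.length = m+1 ∧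
    ((List.range' 1 k).foldl aStep
      (List.replicate (m+1) (0:Int), (List.replicate (m+1) (0:Int)).set 0 1)).2.length = m+1 ∧
    ((List.range' 1 k).foldl aStep
      (List.replicate (m+1) (0:Int), (List.replicate (m+1) (0:Int)).set 0 1)).1.getD k 0 = (XY k).1 ∧
    ((List.range' 1 k).foldl aStep
      (List.replicate (m+1) (0:Int), (List.replicate (m+1) (0:Int)).set 0 1)).2.getD k 0 = (XY k).2 := by
  induction k with
  | zero =>
    simp [XY, List.getD_eq_getElem?_getD]
  | succ k ih =>
    obtain ⟨h0, h1, hx, hy⟩ := ih (Nat.le_of_succ_le hk)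
    rw [List.range'_concat, List.foldl_append]
    set r := (List.range' 1 k).foldl aStep
      (List.replicate (m+1) (0:Int), (List.replicate (m+1) (0:Int)).set 0 1) with hr
    have hlt : k + 1 < m + 1 := by omega
    have hx' : r.1[k]?.getD 0 = (XY k).1 := by
      simpa [List.getD_eq_getElem?_getD] using hx
    have hy' : r.2[k]?.getD 0 = (XY k).2 := by
      simpa [List.getD_eq_getElem?_getD] using hy
    simp only [List.foldl_cons, List.foldl_nil, aStep]
    refine ⟨by simp [h0], by simp [h1], ?_, ?_⟩
    · simp [XY, List.getD_eq_getElem?_getD, Nat.one_add, h0, hlt, hx', hy']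
    · simp [XY, List.getD_eq_getElem?_getD, Nat.one_add, h1, hlt, hx']

lemma recurrence_count_eq_XY (n : Int) (hn : 0 ≤ n) :
    recurrence_count n = (XY n.toNat).2 := by
  have := (loop_inv n.toNat n.toNat le_rfl).2.2.2
  simp only [recurrence_count, if_neg (by omega : ¬ n < 0)]
  exact this

lemma pvM_pos : (0:Int) < pvM := by decide

lemma XY_congr (k : Nat) :
    4 * (XY k).1 ≡ 3 ^ k - (-1) ^ k [ZMOD pvM] ∧
    4 * (XY k).2 ≡ 3 ^ k + 3 * (-1) ^ k [ZMOD pvM] := by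
  induction k with
  | zero => exact ⟨by decide, by decide⟩
  | succ k ih =>
    obtain ⟨hx, hy⟩ := ih
    have hmodx : (XY k).2 % pvM ≡ (XY k).2 [ZMOD pvM] :=
      Int.emod_emod_of_dvd _ dvd_rfl
    have hmody : (3 * (XY k).1) % pvM ≡ 3 * (XY k).1 [ZMOD pvM] :=
      Int.emod_emod_of_dvd _ dvd_rfl
    constructor
    · show 4 * (2 * (XY k).1 + (XY k).2 % pvM) ≡ _ [ZMOD pvM]
      calc 4 * (2 * (XY k).1 + (XY k).2 % pvM)
          ≡ 4 * (2 * (XY k).1 + (XY k).2) [ZMOD pvM] := by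
            exact (Int.ModEq.refl _).mul ((Int.ModEq.refl _).add hmodx)
        _ = 2 * (4 * (XY k).1) + 4 * (XY k).2 := by ring
        _ ≡ 2 * (3 ^ k - (-1) ^ k) + (3 ^ k + 3 * (-1) ^ k) [ZMOD pvM] :=
            ((Int.ModEq.refl 2).mul hx).add hy
        _ = 3 ^ (k+1) - (-1) ^ (k+1) := by ring
    · show 4 * (3 * (XY k).1 % pvM) ≡ _ [ZMOD pvM]
      calc 4 * (3 * (XY k).1 % pvM)
          ≡ 4 * (3 * (XY k).1) [ZMOD pvM] := (Int.ModEq.refl _).mul hmody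
        _ = 3 * (4 * (XY k).1) := by ring
        _ ≡ 3 * (3 ^ k - (-1) ^ k) [ZMOD pvM] := (Int.ModEq.refl 3).mul hx
        _ = 3 ^ (k+1) + 3 * (-1) ^ (k+1) := by ring

lemma XY_snd_range (k : Nat) : 0 ≤ (XY k).2 ∧ (XY k).2 < pvM := by
  cases k with
  | zero => exact ⟨by simp [XY], by decide⟩
  | succ k =>
    refine ⟨Int.emod_nonneg _ (by decide), Int.emod_lt_of_pos _ pvM_pos⟩

lemma gcd4 : Int.gcd pvM 4 = 1 := by decide

lemma inv4_mul : (4:Int) * ((pvM + 1) / 4) ≡ 1 [ZMOD pvM] := by decide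

lemma neg_one_pow_parity (n : Int) (hn : 0 ≤ n) :
    ((-1:Int) ^ n.toNat) = if n % 2 == 0 then 1 else -1 := by
  have h2 : n % 2 = 0 ∨ n % 2 = 1 := by omega
  rcases h2 with h | h
  · have he : Even n.toNat := by rw [Nat.even_iff]; omega
    simp [Even.neg_one_pow he, h]
  · have ho : Odd n.toNat := by rw [Nat.odd_iff]; omega
    simp [Odd.neg_one_pow ho, h]

-- ===== VERDICT (by name: the statement is the Claim_ definition above) =====
theorem recurrence_count_spec : Claim_equal_recurrence_count := by
  intro n _ hpre
  unfold Spec_recurrence_count recurrence_count_alt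
  have hMB : pvMODB = pvM := by decide
  rw [hMB]
  have hn : 0 ≤ n := hpre
  rw [recurrence_count_eq_XY n hn]
  set m := n.toNat with hm
  set s : Int := if n % 2 == 0 then 3 else -3 with hs
  have hs3 : s = 3 * (-1) ^ m := by
    rw [hs, neg_one_pow_parity n hn]
    split_ifs <;> ring
  -- the left value is already reduced mod pvM
  have hred : (XY m).2 = (XY m).2 % pvM :=
    (Int.emod_eq_of_lt (XY_snd_range m).1 (XY_snd_range m).2).symm
  rw [hred]
  -- both sides are `… % pvM`, so it suffices to prove the congruence
  show (XY m).2 ≡ (3 ^ m % pvM + s) * ((pvM + 1) / 4) [ZMOD pvM]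
  have h4 : 4 * (XY m).2 ≡ 4 * ((3 ^ m % pvM + s) * ((pvM + 1) / 4)) [ZMOD pvM] := by
    calc 4 * (XY m).2
        ≡ 3 ^ m + 3 * (-1) ^ m [ZMOD pvM] := (XY_congr m).2
      _ = (3 ^ m + 3 * (-1) ^ m) * 1 := by ring
      _ ≡ (3 ^ m + 3 * (-1) ^ m) * (4 * ((pvM + 1) / 4)) [ZMOD pvM] :=
          (Int.ModEq.refl _).mul inv4_mul.symm
      _ = 4 * ((3 ^ m + 3 * (-1) ^ m) * ((pvM + 1) / 4)) := by ring
      _ = 4 * ((3 ^ m + s) * ((pvM + 1) / 4)) := by rw [hs3]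
      _ ≡ 4 * ((3 ^ m % pvM + s) * ((pvM + 1) / 4)) [ZMOD pvM] := by
          have hmod : Int.ModEq pvM (3 ^ m % pvM) (3 ^ m) :=
            Int.emod_emod_of_dvd _ dvd_rfl
          exact (Int.ModEq.refl 4).mul
            ((hmod.symm.add (Int.ModEq.refl s)).mul (Int.ModEq.refl _))
  simpa [gcd4] using Int.ModEq.cancel_left_div_gcd pvM_pos h4
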